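-- pv_equiv track=rewrite | github.com/marclucas2-cloud/Tplatform | core/execution/slippage_analytics.py | _classify_instrument
-- ===== SOURCE A (Python) =====
-- _INSTRUMENT_TYPE_MAP = {
--     "FX": {"EUR/USD", "GBP/USD", "USD/JPY", "AUD/USD", "USD/CHF", "USD/CAD",
--             "NZD/USD", "EUR/GBP", "EUR/JPY", "GBP/JPY", "EUR/CHF", "AUD/JPY"},
--     "CRYPTO": {"BTCUSDC", "ETHUSDC", "SOLUSDC", "BNBUSDC", "XRPUSDC",
--                "ADAUSDC", "DOGEUSDC", "AVAXUSDC", "DOTUSDC", "MATICUSDC",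
--                "BTCUSDT", "ETHUSDT"},
--     "FUTURES": {"ES", "NQ", "YM", "RTY", "CL", "GC", "SI", "ZB", "ZN"},
-- }
--
-- def _classify_instrument(instrument: str, instrument_type: str) -> str:
--     """Return normalized instrument type from DB column or ticker heuristics."""
--     it = instrument_type.upper() if instrument_type else ""
--     if it in ("EQUITY", "FX", "CRYPTO", "FUTURES"):
--         return it
--     # Fallback heuristic
--     for itype, tickers in _INSTRUMENT_TYPE_MAP.items():
--         if instrument.upper() in tickers:
--             return itype
--     return "EQUITY"
-- ===== SOURCE B (Python) =====
-- # Flat (ticker, type) table, sorted by ticker, built once; lookup is a binary search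
-- # (bisect_left) plus one equality check. Tickers are unique, so order of the original
-- # buckets is irrelevant.
-- _SORTED = [
--     ("ADAUSDC", "CRYPTO"), ("AUD/JPY", "FX"), ("AUD/USD", "FX"), ("AVAXUSDC", "CRYPTO"),
--     ("BNBUSDC", "CRYPTO"), ("BTCUSDC", "CRYPTO"), ("BTCUSDT", "CRYPTO"), ("CL", "FUTURES"),
--     ("DOGEUSDC", "CRYPTO"), ("DOTUSDC", "CRYPTO"), ("ES", "FUTURES"), ("ETHUSDC", "CRYPTO"),
--     ("ETHUSDT", "CRYPTO"), ("EUR/CHF", "FX"), ("EUR/GBP", "FX"), ("EUR/JPY", "FX"),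
--     ("EUR/USD", "FX"), ("GBP/JPY", "FX"), ("GBP/USD", "FX"), ("GC", "FUTURES"),
--     ("MATICUSDC", "CRYPTO"), ("NQ", "FUTURES"), ("NZD/USD", "FX"), ("RTY", "FUTURES"),
--     ("SI", "FUTURES"), ("SOLUSDC", "CRYPTO"), ("USD/CAD", "FX"), ("USD/CHF", "FX"),
--     ("USD/JPY", "FX"), ("XRPUSDC", "CRYPTO"), ("YM", "FUTURES"), ("ZB", "FUTURES"),
--     ("ZN", "FUTURES"),
-- ]
--
-- def _classify_instrument(instrument: str, instrument_type: str) -> str: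
--     """Return normalized instrument type from DB column or ticker heuristics."""
--     it = instrument_type.upper() if instrument_type else ""
--     if it in ("EQUITY", "FX", "CRYPTO", "FUTURES"):
--         return it
--     u = instrument.upper()
--     lo, hi = 0, len(_SORTED)
--     while lo < hi:
--         mid = (lo + hi) // 2
--         if _SORTED[mid][0] < u:
--             lo = mid + 1
--         else:
--             hi = mid
--     if lo < len(_SORTED) and _SORTED[lo][0] == u:
--         return _SORTED[lo][1]
--     return "EQUITY"
-- ===== Notes on version B (the rewrite author's own statement) =====
-- stated objective: alternative
-- what changed: The fallback loop over type buckets with per-bucket membership scans is replaced by a single flat (ticker, type) table sorted once at module level and queried by a hand-written binary search (bisect_left) plus one equality check.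
import Mathlib
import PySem

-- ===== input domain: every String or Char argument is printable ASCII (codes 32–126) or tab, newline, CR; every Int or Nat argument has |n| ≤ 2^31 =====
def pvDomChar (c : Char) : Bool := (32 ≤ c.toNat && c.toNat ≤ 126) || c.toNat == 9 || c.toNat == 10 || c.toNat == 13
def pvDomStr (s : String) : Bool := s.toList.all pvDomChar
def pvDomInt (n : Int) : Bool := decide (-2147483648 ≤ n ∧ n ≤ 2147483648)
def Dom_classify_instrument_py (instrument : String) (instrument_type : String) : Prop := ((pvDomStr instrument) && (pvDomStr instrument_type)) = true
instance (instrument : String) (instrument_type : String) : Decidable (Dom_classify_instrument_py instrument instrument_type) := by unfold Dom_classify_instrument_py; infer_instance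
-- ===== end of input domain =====

-- B replaces A's fallback loop over type buckets by a binary search in a flat
-- (ticker, type) table sorted by ticker, built once; objective: alternative algorithm.

-- ===== PORT A =====
def pvInstrMap : List (String × PySem.Set String) :=
  [("FX", PySem.Set.ofList ["EUR/USD", "GBP/USD", "USD/JPY", "AUD/USD", "USD/CHF", "USD/CAD",
            "NZD/USD", "EUR/GBP", "EUR/JPY", "GBP/JPY", "EUR/CHF", "AUD/JPY"]),
   ("CRYPTO", PySem.Set.ofList ["BTCUSDC", "ETHUSDC", "SOLUSDC", "BNBUSDC", "XRPUSDC",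
               "ADAUSDC", "DOGEUSDC", "AVAXUSDC", "DOTUSDC", "MATICUSDC",
               "BTCUSDT", "ETHUSDT"]),
   ("FUTURES", PySem.Set.ofList ["ES", "NQ", "YM", "RTY", "CL", "GC", "SI", "ZB", "ZN"])]

-- the 'for itype, tickers in _INSTRUMENT_TYPE_MAP.items(): if instrument.upper() in tickers: return itype' loop
def pvLoopA (u : String) : List (String × PySem.Set String) → String
  | [] => "EQUITY"
  | (itype, tickers) :: rest =>
      if PySem.Set.contains tickers u then itype else pvLoopA u rest

def classify_instrument_py (instrument : String) (instrument_type : String) : String :=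
  let it := if instrument_type ≠ "" then PySem.Str.upper instrument_type else ""
  if it = "EQUITY" ∨ it = "FX" ∨ it = "CRYPTO" ∨ it = "FUTURES" then it
  else pvLoopA (PySem.Str.upper instrument) pvInstrMap

-- ===== PORT B =====
-- the flat table _SORTED, sorted by ticker, built once at module level
def pvSorted : List (String × String) :=
  [("ADAUSDC", "CRYPTO"), ("AUD/JPY", "FX"), ("AUD/USD", "FX"), ("AVAXUSDC", "CRYPTO"),
   ("BNBUSDC", "CRYPTO"), ("BTCUSDC", "CRYPTO"), ("BTCUSDT", "CRYPTO"), ("CL", "FUTURES"),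
   ("DOGEUSDC", "CRYPTO"), ("DOTUSDC", "CRYPTO"), ("ES", "FUTURES"), ("ETHUSDC", "CRYPTO"),
   ("ETHUSDT", "CRYPTO"), ("EUR/CHF", "FX"), ("EUR/GBP", "FX"), ("EUR/JPY", "FX"),
   ("EUR/USD", "FX"), ("GBP/JPY", "FX"), ("GBP/USD", "FX"), ("GC", "FUTURES"),
   ("MATICUSDC", "CRYPTO"), ("NQ", "FUTURES"), ("NZD/USD", "FX"), ("RTY", "FUTURES"),
   ("SI", "FUTURES"), ("SOLUSDC", "CRYPTO"), ("USD/CAD", "FX"), ("USD/CHF", "FX"),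
   ("USD/JPY", "FX"), ("XRPUSDC", "CRYPTO"), ("YM", "FUTURES"), ("ZB", "FUTURES"),
   ("ZN", "FUTURES")]

-- the 'while lo < hi' bisect_left loop of Source B (Python '<' on strings = Lean '<': code-point
-- lexicographic, taken on toList so the kernel can evaluate it); fuel = hi - lo bounds the
-- iteration count exactly
def pvBisectGo (u : String) : Nat → Nat → Nat → Nat
  | 0, lo, _ => lo
  | fuel + 1, lo, hi =>
      if lo < hi then
        let mid := (lo + hi) / 2
        if (pvSorted.getD mid ("", "")).1.toList < u.toList then pvBisectGo u fuel (mid + 1) hi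
        else pvBisectGo u fuel lo mid
      else lo

def pvBisect (u : String) (lo hi : Nat) : Nat := pvBisectGo u (hi - lo) lo hi

-- the fallback part of Source B after 'u = instrument.upper()'
def pvFallbackB (u : String) : String :=
  let lo := pvBisect u 0 pvSorted.length
  if lo < pvSorted.length ∧ (pvSorted.getD lo ("", "")).1 = u then (pvSorted.getD lo ("", "")).2
  else "EQUITY"

def classify_instrument_py_alt (instrument : String) (instrument_type : String) : String :=
  let it := if instrument_type ≠ "" then PySem.Str.upper instrument_type else ""
  if it = "EQUITY" ∨ it = "FX" ∨ it = "CRYPTO" ∨ it = "FUTURES" then it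
  else pvFallbackB (PySem.Str.upper instrument)

-- ===== PRECONDITION & SPEC =====
def Spec_classify_instrument_py (instrument : String) (instrument_type : String) (out : String) : Prop := out = classify_instrument_py_alt instrument instrument_type
instance (instrument : String) (instrument_type : String) (out : String) : Decidable (Spec_classify_instrument_py instrument instrument_type out) := by unfold Spec_classify_instrument_py; infer_instance

-- ===== CLAIM (what is proved, stated in full; the proofs are below) =====
def Claim_equal_classify_instrument_py : Prop := ∀ (instrument : String) (instrument_type : String), Dom_classify_instrument_py instrument instrument_type → Spec_classify_instrument_py instrument instrument_type (classify_instrument_py instrument instrument_type)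

-- ===== LEMMAS AND PROOFS =====
def pvKeys : List String := pvSorted.map Prod.fst

-- if u is not a known ticker, B's final equality guard fails, so the fallback is "EQUITY"
theorem pvFallbackB_notmem (u : String) (h : u ∉ pvKeys) : pvFallbackB u = "EQUITY" := by
  unfold pvFallbackB
  rw [if_neg]
  rintro ⟨hlt, heq⟩
  apply h
  rw [← heq]
  exact List.mem_map_of_mem (by
    rw [List.getD_eq_getElem pvSorted ("", "") hlt]; exact List.getElem_mem hlt)

-- if u is not a known ticker, every bucket membership test in A's loop fails
theorem pvLoopA_notmem (u : String) (h : u ∉ pvKeys) : pvLoopA u pvInstrMap = "EQUITY" := by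
  simp [pvLoopA, pvInstrMap]
  split_ifs with h1 h2 h3
  · exact absurd h1 (by rintro (rfl|rfl|rfl|rfl|rfl|rfl|rfl|rfl|rfl|rfl|rfl|rfl) <;> exact h (by decide))
  · exact absurd h2 (by rintro (rfl|rfl|rfl|rfl|rfl|rfl|rfl|rfl|rfl|rfl|rfl|rfl) <;> exact h (by decide))
  · exact absurd h3 (by rintro (rfl|rfl|rfl|rfl|rfl|rfl|rfl|rfl|rfl) <;> exact h (by decide))
  · rfl

-- the two fallbacks agree on every string
theorem pvFallback_eq (u : String) : pvLoopA u pvInstrMap = pvFallbackB u := by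
  by_cases h : u ∈ pvKeys
  · fin_cases h <;> decide
  · rw [pvLoopA_notmem u h, pvFallbackB_notmem u h]

-- ===== VERDICT (by name: the statement is the Claim_ definition above) =====
theorem classify_instrument_py_spec : Claim_equal_classify_instrument_py := by
  intro instrument instrument_type _
  unfold Spec_classify_instrument_py classify_instrument_py classify_instrument_py_alt
  simp only [pvFallback_eq]
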